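-- pv_equiv track=rewrite | github.com/GreenFuze/spade | languages.py | aggregate_languages
-- ===== SOURCE A (Python) =====
-- from typing import Dict, List, Tuple
--
-- def aggregate_languages(ext_histogram: Dict[str, int], ext2lang: Dict[str, str]) -> List[Tuple[str, int]]:
--     """
--     Convert an ext_histogram to a list of (language, weight) sorted by weight desc.
--
--     Rules:
--     - Keys starting with '.' (e.g., '.env') are ignored unless present in ext2lang (rare; typically ignored).
--     - Unknown extensions are ignored.
--
--     Args:
--         ext_histogram: Dictionary mapping extensions to counts
--         ext2lang: Dictionary mapping extensions to languages
--
--     Returns: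
--         List of (language, weight) tuples sorted by weight descending, then name ascending
--     """
--     totals: Dict[str, int] = {}
--
--     for ext, count in ext_histogram.items():
--         if not isinstance(count, int) or count <= 0:
--             continue
--
--         # dotfile keys (".env") are ignored unless present in ext2lang (rare; typically ignored)
--         key = ext.lower()
--         if key.startswith("."):
--             # For dotfiles, only include if the full key (with dot) is explicitly mapped
--             if key not in ext2lang:
--                 continue
--             lang = ext2lang[key]
--         else:
--             # For regular extensions, strip any leading dots
--             key = key.lstrip(".")
--             if not key:  # "."
--                 continue
--             lang = ext2lang.get(key)
--             if not lang:
--                 continue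
--
--         totals[lang] = totals.get(lang, 0) + count
--
--     # sort by count desc, then name asc for stability
--     return sorted(totals.items(), key=lambda kv: (-kv[1], kv[0]))
-- ===== SOURCE B (Python) =====
-- from typing import Dict, List, Optional, Tuple
--
-- def _classify(ext: str, count: int, ext2lang: Dict[str, str]) -> Optional[Tuple[str, int]]:
--     """Same survival rules as the original: returns (language, count) or None."""
--     if not isinstance(count, int) or count <= 0:
--         return None
--     key = ext.lower()
--     if key.startswith("."):
--         if key not in ext2lang:
--             return None
--         return (ext2lang[key], count)
--     key = key.lstrip(".")
--     if not key:
--         return None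
--     lang = ext2lang.get(key)
--     if not lang:
--         return None
--     return (lang, count)
--
-- def aggregate_languages(ext_histogram: Dict[str, int], ext2lang: Dict[str, str]) -> List[Tuple[str, int]]:
--     # sort-based grouping: emit surviving (lang, count) pairs, sort by language,
--     # sum each consecutive run, then order by (-total, language).
--     pairs = []
--     for ext, count in ext_histogram.items():
--         p = _classify(ext, count, ext2lang)
--         if p is not None:
--             pairs.append(p)
--     pairs.sort(key=lambda p: p[0])
--     entries = []
--     i = 0
--     n = len(pairs)
--     while i < n:
--         lang = pairs[i][0]
--         total = 0
--         j = i
--         while j < n and pairs[j][0] == lang: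
--             total += pairs[j][1]
--             j += 1
--         entries.append((lang, total))
--         i = j
--     return sorted(entries, key=lambda kv: (-kv[1], kv[0]))
-- ===== Notes on version B (the rewrite author's own statement) =====
-- stated objective: alternative
-- what changed: Replaces A's dict-based accumulation (hash map updated inside the loop, then sorted) by sort-based grouping: emit surviving (lang,count) pairs, sort them by language, sum each consecutive run with an index loop, then apply the same final (-total, name) sort.
import Mathlib
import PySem

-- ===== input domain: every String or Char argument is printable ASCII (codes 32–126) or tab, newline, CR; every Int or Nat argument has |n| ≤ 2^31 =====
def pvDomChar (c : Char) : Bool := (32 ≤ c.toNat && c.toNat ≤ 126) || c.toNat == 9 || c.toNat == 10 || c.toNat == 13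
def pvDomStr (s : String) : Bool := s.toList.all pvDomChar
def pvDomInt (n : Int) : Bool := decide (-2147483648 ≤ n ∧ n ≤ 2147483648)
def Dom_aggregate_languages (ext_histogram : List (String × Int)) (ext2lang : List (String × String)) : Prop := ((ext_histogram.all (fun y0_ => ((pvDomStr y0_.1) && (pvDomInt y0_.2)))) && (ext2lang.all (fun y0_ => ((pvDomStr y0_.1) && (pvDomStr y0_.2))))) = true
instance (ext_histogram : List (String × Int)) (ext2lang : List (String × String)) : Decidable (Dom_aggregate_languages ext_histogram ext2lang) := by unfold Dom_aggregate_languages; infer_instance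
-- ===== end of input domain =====

-- B replaces A's dict accumulation by sort-based grouping (sort pairs by language, sum runs); same results, proved equal.

-- ===== PORT A =====
-- hand port of str.lstrip("."): drops exactly the leading '.' characters (exact for any string)
def pyLstripDots (s : String) : String := String.ofList (s.toList.dropWhile (· == '.'))

-- the accumulation loop of A (totals[lang] = totals.get(lang, 0) + count)
def pvTotalsA (ext_histogram : List (String × Int)) (e2l : PySem.Dict String String) : PySem.Dict String Int :=
  (PySem.Dict.ofList ext_histogram).items.foldl (fun (totals : PySem.Dict String Int) (p : String × Int) =>
    if p.2 ≤ 0 then totals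
    else
      let key := PySem.Str.lower p.1
      if PySem.Str.startswith key "." then
        match e2l.get? key with
        | none => totals
        | some lang => totals.insert lang (totals.getD lang 0 + p.2)
      else
        let key2 := pyLstripDots key
        if key2 = "" then totals
        else
          match e2l.get? key2 with
          | none => totals
          | some lang =>
            if lang = "" then totals
            else totals.insert lang (totals.getD lang 0 + p.2)) PySem.Dict.empty

def aggregate_languages (ext_histogram : List (String × Int)) (ext2lang : List (String × String)) : List (String × Int) :=
  PySem.List.sorted2 (pvTotalsA ext_histogram (PySem.Dict.ofList ext2lang)).items
    (fun kv => -kv.2) (fun kv => kv.1) false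

-- ===== PORT B =====
-- port of Source B's _classify: (language, count) if the extension survives, none otherwise
def pvClassify (e2l : PySem.Dict String String) (p : String × Int) : Option (String × Int) :=
  if p.2 ≤ 0 then none
  else
    let key := PySem.Str.lower p.1
    if PySem.Str.startswith key "." then
      match e2l.get? key with
      | none => none
      | some lang => some (lang, p.2)
    else
      let key2 := pyLstripDots key
      if key2 = "" then none
      else
        match e2l.get? key2 with
        | none => none
        | some lang => if lang = "" then none else some (lang, p.2)

-- port of Source B's run-summing while loop over the language-sorted pair list
-- (inner while = the takeWhile run, outer index jump = dropWhile)
def pvGroupRuns : List (String × Int) → List (String × Int)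
  | [] => []
  | (l, c) :: t =>
      (l, c + ((t.takeWhile (fun p => p.1 = l)).map (·.2)).sum) ::
        pvGroupRuns (t.dropWhile (fun p => p.1 = l))
  termination_by xs => xs.length
  decreasing_by
    simpa using Nat.lt_succ_of_le (List.length_dropWhile_le _ _)

def aggregate_languages_alt (ext_histogram : List (String × Int)) (ext2lang : List (String × String)) : List (String × Int) :=
  PySem.List.sorted2
    (pvGroupRuns (PySem.List.sorted
      ((PySem.Dict.ofList ext_histogram).items.filterMap (pvClassify (PySem.Dict.ofList ext2lang)))
      (fun p => p.1) false))
    (fun kv => -kv.2) (fun kv => kv.1) false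

-- ===== PRECONDITION & SPEC =====
def Spec_aggregate_languages (ext_histogram : List (String × Int)) (ext2lang : List (String × String)) (out : List (String × Int)) : Prop := out = aggregate_languages_alt ext_histogram ext2lang
instance (ext_histogram : List (String × Int)) (ext2lang : List (String × String)) (out : List (String × Int)) : Decidable (Spec_aggregate_languages ext_histogram ext2lang out) := by unfold Spec_aggregate_languages; infer_instance

-- ===== CLAIM (what is proved, stated in full; the proofs are below) =====
def Claim_equal_aggregate_languages : Prop := ∀ (ext_histogram : List (String × Int)) (ext2lang : List (String × String)), Dom_aggregate_languages ext_histogram ext2lang → Spec_aggregate_languages ext_histogram ext2lang (aggregate_languages ext_histogram ext2lang)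

-- ===== LEMMAS AND PROOFS =====

-- total count attributed to language l by a pair list
def pvSumC (l : String) (ps : List (String × Int)) : Int :=
  ((ps.filter (fun p => p.1 = l)).map (·.2)).sum

-- "classify, then insert-accumulate" step
def pvAcc (d : PySem.Dict String Int) (o : Option (String × Int)) : PySem.Dict String Int :=
  match o with
  | none => d
  | some q => d.insert q.1 (d.getD q.1 0 + q.2)

-- A's loop body is "classify, then insert-accumulate"
theorem pvStepA (e2l : PySem.Dict String String) (d : PySem.Dict String Int) (p : String × Int) :
    (if p.2 ≤ 0 then d
     else
       let key := PySem.Str.lower p.1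
       if PySem.Str.startswith key "." then
         match e2l.get? key with
         | none => d
         | some lang => d.insert lang (d.getD lang 0 + p.2)
       else
         let key2 := pyLstripDots key
         if key2 = "" then d
         else
           match e2l.get? key2 with
           | none => d
           | some lang =>
             if lang = "" then d
             else d.insert lang (d.getD lang 0 + p.2)) =
    pvAcc d (pvClassify e2l p) := by
  unfold pvAcc pvClassify
  by_cases h0 : p.2 ≤ 0
  · simp [h0]
  · by_cases hs : PySem.Chars.startswith (PySem.Chars.lower p.1.toList) ['.'] = true
    · cases h : e2l.get? (PySem.Str.lower p.1) <;> simp [h0, hs, h]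
    · by_cases hk : pyLstripDots (PySem.Str.lower p.1) = ""
      · simp [h0, hs, hk]
      · cases h : e2l.get? (pyLstripDots (PySem.Str.lower p.1)) with
        | none => simp [h0, hs, hk, h]
        | some lang => by_cases hl : lang = "" <;> simp [h0, hs, hk, h, hl]

-- a fold whose body acts only on classified elements is the fold over the filterMap
theorem pv_foldl_classify (E : PySem.Dict String String) (ps : List (String × Int))
    (d : PySem.Dict String Int) :
    ps.foldl (fun d p => pvAcc d (pvClassify E p)) d
      = (ps.filterMap (pvClassify E)).foldl (fun d q => d.insert q.1 (d.getD q.1 0 + q.2)) d := by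
  induction ps generalizing d with
  | nil => rfl
  | cons p t ih =>
      cases h : pvClassify E p <;>
        simp only [List.foldl_cons, List.filterMap_cons, h, pvAcc] <;> exact ih _

-- the accumulated dict reads back the total per language
theorem pv_getD_foldl_ins (qs : List (String × Int)) :
    ∀ (d : PySem.Dict String Int) (l : String),
      (qs.foldl (fun d q => d.insert q.1 (d.getD q.1 0 + q.2)) d).getD l 0
        = d.getD l 0 + pvSumC l qs := by
  induction qs with
  | nil => intro d l; simp [pvSumC]
  | cons q t ih =>
      intro d l
      simp only [List.foldl_cons, ih]
      rcases eq_or_ne l q.1 with h | h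
      · subst h
        simp [pvSumC]
        ring
      · simp [PySem.Dict.getD_insert, pvSumC, h, Ne.symm h]

theorem pv_keys_foldl_ins (qs : List (String × Int)) :
    (qs.foldl (fun d q => d.insert q.1 (d.getD q.1 0 + q.2))
        (PySem.Dict.empty : PySem.Dict String Int)).keys
      = PySem.Set.ofList (qs.map (·.1)) := by
  have := PySem.Dict.keys_foldl_insert_key (ν := Int) qs (fun q => q.1)
    (fun d q => d.getD q.1 0 + q.2) PySem.Dict.empty
  simpa [PySem.Dict.keys_empty, PySem.Set.update_nil_left] using this

theorem pv_nodup_keys_foldl_ins (qs : List (String × Int)) :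
    (qs.foldl (fun d q => d.insert q.1 (d.getD q.1 0 + q.2))
        (PySem.Dict.empty : PySem.Dict String Int)).keys.Nodup := by
  exact PySem.Dict.nodup_keys_foldl_insert_key qs (fun q => q.1)
    (fun d q => d.getD q.1 0 + q.2) PySem.Dict.empty (by simp [PySem.Dict.keys_empty])

-- run-summing over a key-sorted list: distinct keys, same key set, per-key totals
theorem pv_groupRuns_spec (gs : List (String × Int))
    (hp : gs.Pairwise (fun a b => a.1 ≤ b.1)) :
    ((pvGroupRuns gs).map (·.1)).Nodup ∧
    (∀ k, k ∈ (pvGroupRuns gs).map (·.1) ↔ k ∈ gs.map (·.1)) ∧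
    (∀ q ∈ pvGroupRuns gs, q.2 = pvSumC q.1 gs) := by
  induction gs using pvGroupRuns.induct with
  | case1 => simp [pvGroupRuns, pvSumC]
  | case2 l c t ih =>
      have hle : ∀ x ∈ t, l ≤ x.1 := fun x hx => (List.pairwise_cons.mp hp).1 x hx
      have hpt : t.Pairwise (fun a b => a.1 ≤ b.1) := (List.pairwise_cons.mp hp).2
      have hpd : (t.dropWhile (fun p => p.1 = l)).Pairwise (fun a b => a.1 ≤ b.1) :=
        hpt.sublist (List.dropWhile_sublist _)
      -- every element remaining after the run has key strictly above l
      have hd_lt : ∀ x ∈ t.dropWhile (fun p => p.1 = l), l < x.1 := by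
        cases hd : t.dropWhile (fun p => p.1 = l) with
        | nil => simp
        | cons y ys =>
            have hy : ¬ (y.1 = l) := by
              have := List.head?_dropWhile_not (fun p : String × Int => decide (p.1 = l)) t
              rw [hd] at this
              simpa using this
            have hyd : y ∈ t.dropWhile (fun p => p.1 = l) := by rw [hd]; simp
            have hyt : y ∈ t := (List.dropWhile_sublist _).mem hyd
            have hly : l < y.1 := lt_of_le_of_ne (hle y hyt) (fun e => hy e.symm)
            intro x hx
            rcases List.mem_cons.mp hx with rfl | hx
            · exact hly
            · exact lt_of_lt_of_le hly ((List.pairwise_cons.mp (hd ▸ hpd)).1 x hx)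
      have hd_ne : ∀ x ∈ t.dropWhile (fun p => p.1 = l), x.1 ≠ l :=
        fun x hx => ne_of_gt (hd_lt x hx)
      have htw : ∀ x ∈ t.takeWhile (fun p => p.1 = l), x.1 = l := by
        intro x hx; simpa using List.mem_takeWhile_imp hx
      have ht : t.takeWhile (fun p => p.1 = l) ++ t.dropWhile (fun p => p.1 = l) = t :=
        List.takeWhile_append_dropWhile
      obtain ⟨ihn, ihm, ihv⟩ := ih hpd
      -- per-key totals of (l,c)::t
      have hsum_l : pvSumC l ((l, c) :: t)
          = c + ((t.takeWhile (fun p => p.1 = l)).map (·.2)).sum := by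
        unfold pvSumC
        rw [← ht, List.filter_cons, List.filter_append]
        have h1 : (t.takeWhile (fun p => p.1 = l)).filter (fun p => p.1 = l)
            = t.takeWhile (fun p => p.1 = l) :=
          List.filter_eq_self.mpr (fun x hx => by simpa using htw x hx)
        have h2 : (t.dropWhile (fun p => p.1 = l)).filter (fun p => p.1 = l) = [] :=
          List.filter_eq_nil_iff.mpr (fun x hx => by simpa using hd_ne x hx)
        simp [h1, h2]
      have hsum_ne : ∀ k, k ≠ l → pvSumC k ((l, c) :: t)
          = pvSumC k (t.dropWhile (fun p => p.1 = l)) := by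
        intro k hk
        unfold pvSumC
        rw [← ht, List.filter_cons, List.filter_append]
        have h1 : (t.takeWhile (fun p => p.1 = l)).filter (fun p => p.1 = k) = [] :=
          List.filter_eq_nil_iff.mpr (fun x hx => by simp [htw x hx, Ne.symm hk])
        simp [h1, Ne.symm hk]
      have hmem_t : ∀ k, k ∈ t.map (·.1) ↔
          (k = l ∧ t.takeWhile (fun p => p.1 = l) ≠ []) ∨
            k ∈ (t.dropWhile (fun p => p.1 = l)).map (·.1) := by
        intro k
        constructor
        · intro hk
          rw [← ht, List.map_append, List.mem_append] at hk
          rcases hk with hk | hk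
          · rcases List.mem_map.mp hk with ⟨x, hx, rfl⟩
            exact Or.inl ⟨htw x hx, fun e => by simp [e] at hx⟩
          · exact Or.inr hk
        · intro hk
          rw [← ht, List.map_append, List.mem_append]
          rcases hk with ⟨hkl, hne⟩ | hk
          · rw [hkl]
            left
            cases hw : t.takeWhile (fun p => p.1 = l) with
            | nil => exact absurd hw hne
            | cons y ys =>
                have hyw : y ∈ t.takeWhile (fun p => p.1 = l) := by simp [hw]
                exact List.mem_map.mpr ⟨y, by simp, htw y hyw⟩
          · exact Or.inr hk
      rw [pvGroupRuns]
      refine ⟨?_, ?_, ?_⟩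
      · simp only [List.map_cons, List.nodup_cons]
        refine ⟨fun hl => ?_, ihn⟩
        rcases List.mem_map.mp ((ihm l).mp hl) with ⟨x, hx, hxl⟩
        exact hd_ne x hx hxl
      · intro k
        simp only [List.map_cons, List.mem_cons, ihm, hmem_t]
        constructor
        · rintro (rfl | hk)
          · exact Or.inl rfl
          · exact Or.inr (Or.inr hk)
        · rintro (rfl | ⟨rfl, _⟩ | hk)
          · exact Or.inl rfl
          · exact Or.inl rfl
          · exact Or.inr hk
      · intro q hq
        rcases List.mem_cons.mp hq with rfl | hq
        · simpa using hsum_l.symm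
        · have hq1 : q.1 ∈ (t.dropWhile (fun p => p.1 = l)).map (·.1) :=
            (ihm q.1).mp (List.mem_map.mpr ⟨q, hq, rfl⟩)
          rcases List.mem_map.mp hq1 with ⟨x, hx, hxe⟩
          have : q.1 ≠ l := hxe ▸ hd_ne x hx
          rw [ihv q hq, ← hsum_ne q.1 this]

-- the tuple-key sort is the single sort under the lexicographic key, so it only
-- depends on the input up to permutation (the key is injective)
theorem pv_sorted2_eq_sorted_lex (xs : List (String × Int)) :
    PySem.List.sorted2 xs (fun kv => -kv.2) (fun kv => kv.1) false
      = PySem.List.sorted xs (fun kv => toLex ((-kv.2 : Int), kv.1)) false := by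
  have hb : ∀ a b : String × Int,
      (decide (-a.2 < -b.2) || (!decide (-b.2 < -a.2) && decide (a.1 < b.1)))
        = decide (toLex ((-a.2 : Int), a.1) < toLex ((-b.2 : Int), b.1)) := by
    intro a b
    refine Bool.eq_iff_iff.mpr ?_
    simp only [Bool.or_eq_true, Bool.and_eq_true, Bool.not_eq_true', decide_eq_true_eq,
      decide_eq_false_iff_not, Prod.Lex.lt_iff, ofLex_toLex]
    constructor
    · rintro (h | ⟨h1, h2⟩)
      · exact Or.inl h
      · by_cases he : (-a.2 : Int) = -b.2
        · exact Or.inr ⟨he, h2⟩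
        · exact Or.inl (by omega)
    · rintro (h | ⟨h1, h2⟩)
      · exact Or.inl h
      · exact Or.inr ⟨by omega, h2⟩
  unfold PySem.List.sorted2 PySem.List.sorted
  simp only [Bool.false_eq_true, if_false]
  congr 1
  funext acc x
  congr 1
  funext a b
  simpa using hb a b

theorem pv_sorted2_of_perm (xs ys : List (String × Int)) (hp : xs.Perm ys) :
    PySem.List.sorted2 xs (fun kv => -kv.2) (fun kv => kv.1) false
      = PySem.List.sorted2 ys (fun kv => -kv.2) (fun kv => kv.1) false := by
  rw [pv_sorted2_eq_sorted_lex, pv_sorted2_eq_sorted_lex]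
  refine PySem.List.sorted_eq_sorted_of_perm xs ys _ ?_ hp
  intro a b h
  have h' := congrArg ofLex h
  have h1 : -a.2 = -b.2 := congrArg Prod.fst h'
  have h2 : a.1 = b.1 := congrArg Prod.snd h'
  exact Prod.ext h2 (by omega)

-- ===== VERDICT (by name: the statement is the Claim_ definition above) =====
theorem aggregate_languages_spec : Claim_equal_aggregate_languages := by
  intro hist e2lst _
  show aggregate_languages hist e2lst = aggregate_languages_alt hist e2lst
  unfold aggregate_languages aggregate_languages_alt
  -- A's loop is the classify-then-accumulate fold over the surviving pairs
  have hfold : pvTotalsA hist (PySem.Dict.ofList e2lst)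
      = ((PySem.Dict.ofList hist).items.filterMap (pvClassify (PySem.Dict.ofList e2lst))).foldl
          (fun d q => d.insert q.1 (d.getD q.1 0 + q.2)) PySem.Dict.empty := by
    unfold pvTotalsA
    rw [PySem.List.foldl_congr_mem (PySem.Dict.ofList hist).items _
      (fun d p => pvAcc d (pvClassify (PySem.Dict.ofList e2lst) p)) PySem.Dict.empty
      (fun d p _ => pvStepA (PySem.Dict.ofList e2lst) d p)]
    apply pv_foldl_classify
  rw [hfold]
  generalize hP : (PySem.Dict.ofList hist).items.filterMap (pvClassify (PySem.Dict.ofList e2lst)) = pairs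
  set gs := PySem.List.sorted pairs (fun p => p.1) false with hgs
  set D := pairs.foldl (fun d q => d.insert q.1 (d.getD q.1 0 + q.2)) PySem.Dict.empty with hD
  have hnd : D.keys.Nodup := pv_nodup_keys_foldl_ins pairs
  have hkeys : D.keys = PySem.Set.ofList (pairs.map (·.1)) := pv_keys_foldl_ins pairs
  have hDitems : D.items = D.keys.map (fun k => (k, D.getD k 0)) :=
    PySem.Dict.items_eq_map_keys D hnd 0
  have hDval : ∀ k, D.getD k 0 = pvSumC k pairs := by
    intro k
    rw [hD, pv_getD_foldl_ins pairs PySem.Dict.empty k, PySem.Dict.getD_empty]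
    ring
  have hperm_pairs : gs.Perm pairs := PySem.List.sorted_perm pairs (fun p => p.1) false
  have hsumC : ∀ k, pvSumC k gs = pvSumC k pairs := by
    intro k
    exact List.Perm.sum_eq (List.Perm.map _ (hperm_pairs.filter _))
  obtain ⟨hgn, hgm, hgv⟩ := pv_groupRuns_spec gs (PySem.List.sorted_pairwise pairs (fun p => p.1))
  -- each side is its (Nodup) key list paired with the shared per-key totals
  have hself : ∀ (L : List (String × Int)), (∀ q ∈ L, q.2 = pvSumC q.1 pairs) →
      L = (L.map (·.1)).map (fun k => (k, pvSumC k pairs)) := by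
    intro L hv
    rw [List.map_map]
    exact (List.map_id L).symm.trans (List.map_congr_left (fun q hq => by
      simp [Function.comp, ← hv q hq]))
  have hA : D.items = (D.items.map (·.1)).map (fun k => (k, pvSumC k pairs)) := by
    refine hself D.items ?_
    intro q hq
    rw [hDitems] at hq
    rcases List.mem_map.mp hq with ⟨k, _, rfl⟩
    simpa using hDval k
  have hB : pvGroupRuns gs = ((pvGroupRuns gs).map (·.1)).map (fun k => (k, pvSumC k pairs)) := by
    refine hself (pvGroupRuns gs) ?_
    intro q hq
    rw [hgv q hq, hsumC]
  have hkeysA : D.items.map (·.1) = D.keys := rfl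
  have hpermk : (D.items.map (·.1)).Perm ((pvGroupRuns gs).map (·.1)) := by
    rw [hkeysA]
    refine (List.perm_ext_iff_of_nodup (hkeys ▸ PySem.Set.nodup_ofList _) hgn).mpr ?_
    intro k
    rw [hkeys, hgm]
    constructor
    · intro hk
      exact (List.Perm.mem_iff (hperm_pairs.map (·.1))).mpr
        (by simpa using (PySem.Set.mem_ofList _ _).mp hk)
    · intro hk
      exact (PySem.Set.mem_ofList _ _).mpr (by
        simpa using (List.Perm.mem_iff (hperm_pairs.map (·.1))).mp hk)
  have hperm : D.items.Perm (pvGroupRuns gs) := by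
    rw [hA, hB]
    exact hpermk.map _
  exact pv_sorted2_of_perm _ _ hperm
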